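-- pv_equiv track=rewrite | github.com/consistentJake/AgenticRecommender | agentic_recommender/agents/vendor_ranker.py | _extract_items_from_text
-- ===== SOURCE A (Python) =====
-- from typing import Dict, Any, List
--
-- def _extract_items_from_text(text: str, candidates: List[str]) -> List[str]:
--     """Extract candidate mentions from text as fallback."""
--     text_lower = text.lower()
--     found = []
--     seen = set()
--
--     for candidate in candidates:
--         if candidate.lower() in text_lower and candidate.lower() not in seen:
--             found.append(candidate)
--             seen.add(candidate.lower())
--
--     for c in candidates:
--         if c.lower() not in seen:
--             found.append(c)
--
--     return found
-- ===== SOURCE B (Python) =====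
-- def _extract_items_from_text(text, candidates):
--     """One pass: route each candidate to matched (deduped, lowercase-substring hit) or unmatched (kept verbatim)."""
--     text_lower = text.lower()
--     matched, unmatched, seen = [], [], set()
--     for candidate in candidates:
--         cl = candidate.lower()
--         if cl in text_lower:
--             if cl not in seen:
--                 matched.append(candidate)
--                 seen.add(cl)
--         else:
--             unmatched.append(candidate)
--     return matched + unmatched
-- ===== Notes on version B (the rewrite author's own statement) =====
-- stated objective: simpler
-- what changed: Replaces A's two sequential passes over candidates (matched pass with a seen-set, then a second full pass re-testing seen for the rest) by a single routing pass that sends each candidate to a deduped matched list or an unmatched list and concatenates them.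
import Mathlib
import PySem

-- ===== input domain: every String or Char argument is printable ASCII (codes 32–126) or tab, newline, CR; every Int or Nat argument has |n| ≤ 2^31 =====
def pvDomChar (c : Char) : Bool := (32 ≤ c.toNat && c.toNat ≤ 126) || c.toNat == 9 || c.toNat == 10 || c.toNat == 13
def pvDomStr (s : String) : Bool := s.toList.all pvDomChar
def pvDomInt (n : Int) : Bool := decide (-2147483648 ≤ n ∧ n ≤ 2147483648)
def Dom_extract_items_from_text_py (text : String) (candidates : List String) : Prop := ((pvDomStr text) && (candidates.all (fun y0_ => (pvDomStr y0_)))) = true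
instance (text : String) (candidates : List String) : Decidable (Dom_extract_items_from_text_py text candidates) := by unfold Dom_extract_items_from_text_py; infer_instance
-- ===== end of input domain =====

-- B replaces A's two sequential passes by a single routing pass into matched/unmatched lists (objective: simpler).

-- ===== PORT A =====
def extract_items_from_text_py (text : String) (candidates : List String) : List String :=
  let text_lower := PySem.Str.lower text
  let fs := candidates.foldl (fun (st : List String × PySem.Set String) candidate =>
      if PySem.Str.isIn (PySem.Str.lower candidate) text_lower &&
         !(PySem.Set.contains st.2 (PySem.Str.lower candidate)) then
        (st.1 ++ [candidate], PySem.Set.add st.2 (PySem.Str.lower candidate))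
      else st) ([], PySem.Set.empty)
  candidates.foldl (fun found c =>
      if !(PySem.Set.contains fs.2 (PySem.Str.lower c)) then found ++ [c] else found) fs.1

-- ===== PORT B =====
def extract_items_from_text_py_alt (text : String) (candidates : List String) : List String :=
  let text_lower := PySem.Str.lower text
  let st := candidates.foldl (fun (st : List String × List String × PySem.Set String) candidate =>
      let cl := PySem.Str.lower candidate
      if PySem.Str.isIn cl text_lower then
        if PySem.Set.contains st.2.2 cl then st
        else (st.1 ++ [candidate], st.2.1, PySem.Set.add st.2.2 cl)
      else (st.1, st.2.1 ++ [candidate], st.2.2)) ([], [], PySem.Set.empty)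
  st.1 ++ st.2.1

-- ===== PRECONDITION & SPEC =====
def Spec_extract_items_from_text_py (text : String) (candidates : List String) (out : List String) : Prop := out = extract_items_from_text_py_alt text candidates
instance (text : String) (candidates : List String) (out : List String) : Decidable (Spec_extract_items_from_text_py text candidates out) := by unfold Spec_extract_items_from_text_py; infer_instance

-- ===== CLAIM (what is proved, stated in full; the proofs are below) =====
def Claim_equal_extract_items_from_text_py : Prop := ∀ (text : String) (candidates : List String), Dom_extract_items_from_text_py text candidates → Spec_extract_items_from_text_py text candidates (extract_items_from_text_py text candidates)

-- ===== LEMMAS AND PROOFS =====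

-- A's first-loop stepper (exactly the fold body of the port of A)
def stepA (tl : String) (st : List String × PySem.Set String) (c : String) : List String × PySem.Set String :=
  if PySem.Str.isIn (PySem.Str.lower c) tl && !(PySem.Set.contains st.2 (PySem.Str.lower c)) then
    (st.1 ++ [c], PySem.Set.add st.2 (PySem.Str.lower c))
  else st

-- B's stepper (exactly the fold body of the port of B)
def stepB (tl : String) (st : List String × List String × PySem.Set String) (c : String) : List String × List String × PySem.Set String :=
  let cl := PySem.Str.lower c
  if PySem.Str.isIn cl tl then
    if PySem.Set.contains st.2.2 cl then st
    else (st.1 ++ [c], st.2.1, PySem.Set.add st.2.2 cl)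
  else (st.1, st.2.1 ++ [c], st.2.2)

theorem isIn_lower_eq (tl d : String) :
    PySem.Str.isIn (PySem.Str.lower d) tl = PySem.Chars.isIn (PySem.Chars.lower d.toList) tl.toList := by
  simp

-- B's fold couples to A's first fold: same matched list and seen set; unmatched collects the non-hits.
theorem foldB_eq (tl : String) (cs : List String) (f u : List String) (s : PySem.Set String) :
    cs.foldl (stepB tl) (f, u, s) =
      ((cs.foldl (stepA tl) (f, s)).1,
       u ++ cs.filter (fun c => !(PySem.Str.isIn (PySem.Str.lower c) tl)),
       (cs.foldl (stepA tl) (f, s)).2) := by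
  induction cs generalizing f u s with
  | nil => simp
  | cons c cs ih =>
    simp only [List.foldl_cons]
    by_cases h : PySem.Str.isIn (PySem.Str.lower c) tl = true
    · have hch : PySem.Chars.isIn (PySem.Chars.lower c.toList) tl.toList = true := by
        rw [← isIn_lower_eq]; exact h
      by_cases hc : PySem.Str.lower c ∈ s
      · have hB : stepB tl (f, u, s) c = (f, u, s) := by simp [stepB, hch, hc]
        have hA : stepA tl (f, s) c = (f, s) := by simp [stepA, hch, hc]
        rw [hB, hA, ih]
        simp [hch]
      · have hB : stepB tl (f, u, s) c = (f ++ [c], u, PySem.Set.add s (PySem.Str.lower c)) := by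
          simp [stepB, hch, hc]
        have hA : stepA tl (f, s) c = (f ++ [c], PySem.Set.add s (PySem.Str.lower c)) := by
          simp [stepA, hch, hc]
        rw [hB, hA, ih]
        simp [hch]
    · have hch : PySem.Chars.isIn (PySem.Chars.lower c.toList) tl.toList = false := by
        rw [← isIn_lower_eq]; exact Bool.eq_false_iff.mpr h
      have hB : stepB tl (f, u, s) c = (f, u ++ [c], s) := by simp [stepB, hch]
      have hA : stepA tl (f, s) c = (f, s) := by simp [stepA, hch]
      rw [hB, hA, ih]
      simp [hch]

-- seen after A's first loop: the initial seen plus the lowers of the candidates that hit the text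
theorem seen_char (tl : String) (cs : List String) (f : List String) (s : PySem.Set String) (x : String) :
    x ∈ (cs.foldl (stepA tl) (f, s)).2 ↔
      x ∈ s ∨ ∃ c ∈ cs, PySem.Str.lower c = x ∧ PySem.Str.isIn (PySem.Str.lower c) tl = true := by
  induction cs generalizing f s with
  | nil => simp
  | cons c cs ih =>
    simp only [List.foldl_cons]
    by_cases h : PySem.Str.isIn (PySem.Str.lower c) tl = true
    · have hch : PySem.Chars.isIn (PySem.Chars.lower c.toList) tl.toList = true := by
        rw [← isIn_lower_eq]; exact h
      by_cases hc : PySem.Str.lower c ∈ s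
      · have hA : stepA tl (f, s) c = (f, s) := by simp [stepA, hch, hc]
        rw [hA, ih]
        constructor
        · rintro (hs | ⟨c', hm, hx, ht⟩)
          · exact Or.inl hs
          · exact Or.inr ⟨c', List.mem_cons_of_mem _ hm, hx, ht⟩
        · rintro (hs | ⟨c', hm, hx, ht⟩)
          · exact Or.inl hs
          · rcases List.mem_cons.mp hm with rfl | hm'
            · exact Or.inl (hx ▸ hc)
            · exact Or.inr ⟨c', hm', hx, ht⟩
      · have hA : stepA tl (f, s) c = (f ++ [c], PySem.Set.add s (PySem.Str.lower c)) := by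
          simp [stepA, hch, hc]
        rw [hA, ih]
        simp only [PySem.Set.mem_add]
        constructor
        · rintro ((hs | rfl) | ⟨c', hm, hx, ht⟩)
          · exact Or.inl hs
          · exact Or.inr ⟨c, List.mem_cons_self .., rfl, h⟩
          · exact Or.inr ⟨c', List.mem_cons_of_mem _ hm, hx, ht⟩
        · rintro (hs | ⟨c', hm, hx, ht⟩)
          · exact Or.inl (Or.inl hs)
          · rcases List.mem_cons.mp hm with rfl | hm'
            · exact Or.inl (Or.inr hx.symm)
            · exact Or.inr ⟨c', hm', hx, ht⟩
    · have hch : PySem.Chars.isIn (PySem.Chars.lower c.toList) tl.toList = false := by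
        rw [← isIn_lower_eq]; exact Bool.eq_false_iff.mpr h
      have hA : stepA tl (f, s) c = (f, s) := by simp [stepA, hch]
      rw [hA, ih]
      constructor
      · rintro (hs | ⟨c', hm, hx, ht⟩)
        · exact Or.inl hs
        · exact Or.inr ⟨c', List.mem_cons_of_mem _ hm, hx, ht⟩
      · rintro (hs | ⟨c', hm, hx, ht⟩)
        · exact Or.inl hs
        · rcases List.mem_cons.mp hm with rfl | hm'
          · exact absurd ht h
          · exact Or.inr ⟨c', hm', hx, ht⟩

-- A's second loop is a filter once seen membership is decided by the substring test (for every c in cs)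
theorem loop2_eq (tl : String) (s : PySem.Set String) (cs : List String) (f : List String)
    (hs : ∀ c ∈ cs, (PySem.Str.lower c ∈ s ↔ PySem.Str.isIn (PySem.Str.lower c) tl = true)) :
    cs.foldl (fun found c => if !(PySem.Set.contains s (PySem.Str.lower c)) then found ++ [c] else found) f =
      f ++ cs.filter (fun c => !(PySem.Str.isIn (PySem.Str.lower c) tl)) := by
  induction cs generalizing f with
  | nil => simp
  | cons c cs ih =>
    have hc := hs c (List.mem_cons_self ..)
    simp only [List.foldl_cons, List.filter_cons]
    by_cases h : PySem.Str.isIn (PySem.Str.lower c) tl = true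
    · have hch : PySem.Chars.isIn (PySem.Chars.lower c.toList) tl.toList = true := by
        rw [← isIn_lower_eq]; exact h
      have hmem : PySem.Set.contains s (PySem.Str.lower c) = true :=
        (PySem.Set.contains_iff s _).mpr (hc.mpr h)
      rw [hmem, if_neg (by simp), if_neg (by simp [hch])]
      exact ih f (fun c' h' => hs c' (List.mem_cons_of_mem _ h'))
    · have hch : PySem.Chars.isIn (PySem.Chars.lower c.toList) tl.toList = false := by
        rw [← isIn_lower_eq]; exact Bool.eq_false_iff.mpr h
      have hmem : PySem.Set.contains s (PySem.Str.lower c) = false := by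
        rw [Bool.eq_false_iff]; intro hx; exact h (hc.mp ((PySem.Set.contains_iff s _).mp hx))
      rw [hmem, if_pos (by simp), if_pos (by simp [hch]),
        ih (f ++ [c]) (fun c' h' => hs c' (List.mem_cons_of_mem _ h'))]
      simp

-- ===== VERDICT (by name: the statement is the Claim_ definition above) =====
theorem extract_items_from_text_py_spec : Claim_equal_extract_items_from_text_py := by
  intro text candidates _
  unfold Spec_extract_items_from_text_py extract_items_from_text_py extract_items_from_text_py_alt
  set tl := PySem.Str.lower text with htl
  have hA1 : (fun (st : List String × PySem.Set String) candidate =>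
      if PySem.Str.isIn (PySem.Str.lower candidate) tl &&
         !(PySem.Set.contains st.2 (PySem.Str.lower candidate)) then
        (st.1 ++ [candidate], PySem.Set.add st.2 (PySem.Str.lower candidate))
      else st) = stepA tl := by funext st c; rfl
  have hB1 : (fun (st : List String × List String × PySem.Set String) candidate =>
      let cl := PySem.Str.lower candidate
      if PySem.Str.isIn cl tl then
        if PySem.Set.contains st.2.2 cl then st
        else (st.1 ++ [candidate], st.2.1, PySem.Set.add st.2.2 cl)
      else (st.1, st.2.1 ++ [candidate], st.2.2)) = stepB tl := by funext st c; rfl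
  simp only [hA1, hB1]
  rw [foldB_eq]
  have hseen : ∀ c ∈ candidates,
      (PySem.Str.lower c ∈ (candidates.foldl (stepA tl) ([], PySem.Set.empty)).2 ↔
        PySem.Str.isIn (PySem.Str.lower c) tl = true) := by
    intro c hc
    rw [seen_char]
    constructor
    · rintro (hs | ⟨c', _, hx, ht⟩)
      · simp [PySem.Set.empty] at hs
      · exact hx ▸ ht
    · intro h; exact Or.inr ⟨c, hc, rfl, h⟩
  exact loop2_eq tl _ candidates _ hseen
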